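-- pv_equiv track=rewrite | github.com/FeixLiu/paddle-galvatron | paddlenlp/experimental/galvatron/profiler/hardware_profiler.py | generate_allreduce_groups
-- ===== SOURCE A (Python) =====
-- from typing import List, Tuple, Union
--
-- def generate_allreduce_groups(world_size: int, allreduce_size: int) -> List[List[int]]:
--     """Generate groups for allreduce communication
--
--     Args:
--         world_size: Total number of processes
--         allreduce_size: Size of each allreduce group
--         allreduce_consec: Whether to use consecutive GPU mapping
--
--     Returns:
--         List[List[int]]: List of process groups for allreduce
--     """
--     allreduce_size = int(allreduce_size)
--     num_allreduce_groups = int(world_size // allreduce_size)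
--     allreduce_groups = []
--     for i in range(num_allreduce_groups):
--         ranks = list(range(i * allreduce_size, (i + 1) * allreduce_size))
--         allreduce_groups.append(ranks)
--     return allreduce_groups
-- ===== SOURCE B (Python) =====
-- def generate_allreduce_groups(world_size: int, allreduce_size: int):
--     allreduce_size = int(allreduce_size)
--     num_allreduce_groups = int(world_size // allreduce_size)
--     groups = [[] for _ in range(num_allreduce_groups)]
--     # one flat distributing scan: each rank r goes to bucket r // allreduce_size
--     for r in range(num_allreduce_groups * allreduce_size):
--         groups[r // allreduce_size].append(r)
--     return groups
-- ===== Notes on version B (the rewrite author's own statement) =====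
-- stated objective: alternative
-- what changed: A builds each group separately with a per-group range(i*size,(i+1)*size) inside a loop over groups; B pre-creates the empty buckets and runs one flat distributing scan over all ranks, appending each rank r to bucket r // allreduce_size.
-- outside the precondition, e.g. on generate_allreduce_groups(8, -3): A returns [], B raises IndexError
import Mathlib
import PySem

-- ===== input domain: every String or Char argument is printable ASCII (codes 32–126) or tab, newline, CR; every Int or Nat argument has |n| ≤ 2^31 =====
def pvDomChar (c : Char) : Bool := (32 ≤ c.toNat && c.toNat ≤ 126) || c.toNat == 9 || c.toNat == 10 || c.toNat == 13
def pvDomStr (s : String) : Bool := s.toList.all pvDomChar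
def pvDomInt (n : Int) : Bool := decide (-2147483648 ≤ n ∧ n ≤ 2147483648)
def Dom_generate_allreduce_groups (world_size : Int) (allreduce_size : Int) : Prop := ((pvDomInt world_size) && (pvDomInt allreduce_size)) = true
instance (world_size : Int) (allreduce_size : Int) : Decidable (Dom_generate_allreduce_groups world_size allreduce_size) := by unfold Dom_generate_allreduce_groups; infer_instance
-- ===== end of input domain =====

-- B replaces A's per-group construction by one flat distributing scan over all ranks (alternative decomposition, same cost).

-- ===== PORT A =====
def generate_allreduce_groups (world_size : Int) (allreduce_size : Int) : List (List Int) :=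
  let num_allreduce_groups : Int := PySem.Int.floordiv world_size allreduce_size
  (PySem.List.pyRange 0 num_allreduce_groups 1).foldl
    (fun allreduce_groups i =>
      allreduce_groups ++ [PySem.List.pyRange (i * allreduce_size) ((i + 1) * allreduce_size) 1])
    []

-- ===== PORT B =====
def generate_allreduce_groups_alt (world_size : Int) (allreduce_size : Int) : List (List Int) :=
  let num : Int := PySem.Int.floordiv world_size allreduce_size
  let groups : List (List Int) := (PySem.List.pyRange 0 num 1).map (fun _ => ([] : List Int))
  -- groups[r // allreduce_size].append(r); under Pre_ the index is nonnegative and in range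
  -- whenever the loop body runs, so plain List.set/getD at the .toNat index is exact there.
  (PySem.List.pyRange 0 (num * allreduce_size) 1).foldl
    (fun g r =>
      g.set (PySem.Int.floordiv r allreduce_size).toNat
        ((g.getD (PySem.Int.floordiv r allreduce_size).toNat []) ++ [r]))
    groups

-- ===== PRECONDITION & SPEC =====
-- Pre_ excludes allreduce_size = 0, where A's '//' raises ZeroDivisionError, and the meaningless
-- corner allreduce_size < 0 with world_size > 0, where A accidentally returns [] while B's
-- distributing scan itself raises IndexError.
def Pre_generate_allreduce_groups (world_size : Int) (allreduce_size : Int) : Prop :=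
  0 < allreduce_size ∨ (allreduce_size < 0 ∧ world_size ≤ 0)
instance (world_size : Int) (allreduce_size : Int) : Decidable (Pre_generate_allreduce_groups world_size allreduce_size) := by unfold Pre_generate_allreduce_groups; infer_instance
def pvWitness_generate_allreduce_groups : Int × Int := (8, 2)

def Spec_generate_allreduce_groups (world_size : Int) (allreduce_size : Int) (out : List (List Int)) : Prop := out = generate_allreduce_groups_alt world_size allreduce_size
instance (world_size : Int) (allreduce_size : Int) (out : List (List Int)) : Decidable (Spec_generate_allreduce_groups world_size allreduce_size out) := by unfold Spec_generate_allreduce_groups; infer_instance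

-- ===== CLAIM (what is proved, stated in full; the proofs are below) =====
def Claim_equal_generate_allreduce_groups : Prop := ∀ (world_size : Int) (allreduce_size : Int), Dom_generate_allreduce_groups world_size allreduce_size → Pre_generate_allreduce_groups world_size allreduce_size → Spec_generate_allreduce_groups world_size allreduce_size (generate_allreduce_groups world_size allreduce_size)

-- ===== LEMMAS AND PROOFS =====

-- B's loop body, named for the proofs (definitionally the lambda in the port)
def pvStep (s : Int) (g : List (List Int)) (r : Int) : List (List Int) :=
  g.set (PySem.Int.floordiv r s).toNat ((g.getD (PySem.Int.floordiv r s).toNat []) ++ [r])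

theorem pv_alt_eq (ws s : Int) :
    generate_allreduce_groups_alt ws s
      = (PySem.List.pyRange 0 (PySem.Int.floordiv ws s * s) 1).foldl (pvStep s)
          ((PySem.List.pyRange 0 (PySem.Int.floordiv ws s) 1).map (fun _ => ([] : List Int))) := rfl

-- flatten of singleton-map is map
theorem pv_flatten_singleton (g : Int → List Int) (l : List Int) :
    (List.map (fun i => [g i]) l).flatten = l.map g := by
  induction l with
  | nil => rfl
  | cons x xs ih => simp [ih]

-- A's foldl-of-appends is a map
theorem pv_A_as_map (ws s : Int) :
    generate_allreduce_groups ws s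
      = (PySem.List.pyRange 0 (PySem.Int.floordiv ws s) 1).map
          (fun i => PySem.List.pyRange (i * s) ((i + 1) * s) 1) := by
  show List.foldl _ [] _ = _
  rw [PySem.List.foldl_append_eq_flatMap]
  simp only [List.flatMap, List.nil_append]
  exact pv_flatten_singleton _ _

-- the distributing step on the empty bucket list does nothing
theorem pv_foldl_step_nil (s : Int) (l : List Int) :
    l.foldl (pvStep s) ([] : List (List Int)) = [] := by
  induction l with
  | nil => rfl
  | cons r l ih => simpa [pvStep] using ih

-- every element of the k-th chunk distributes to bucket k (s > 0)
theorem pv_div_chunk (s : Int) (hs : 0 < s) (k : Nat) (r : Int)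
    (h1 : (k : Int) * s ≤ r) (h2 : r < ((k : Int) + 1) * s) :
    PySem.Int.floordiv r s = (k : Int) := by
  rw [PySem.Int.floordiv_eq_iff_of_pos hs]
  exact ⟨h1, h2⟩

-- folding a list all of whose elements distribute to bucket k appends it wholesale to bucket k
theorem pv_fold_all_to (s : Int) (l : List Int) :
    ∀ (b : List (List Int)) (k : Nat), k < b.length →
      (∀ r ∈ l, (PySem.Int.floordiv r s).toNat = k) →
      l.foldl (pvStep s) b = b.set k ((b.getD k []) ++ l) := by
  induction l with
  | nil =>
    intro b k hk _
    simp [List.getD_eq_getElem?_getD, List.getElem?_eq_getElem hk]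
  | cons r l ih =>
    intro b k hk hmem
    have hr : (PySem.Int.floordiv r s).toNat = k := hmem r (by simp)
    have hstep : pvStep s b r = b.set k ((b.getD k []) ++ [r]) := by
      simp [pvStep, hr]
    have hk' : k < (b.set k ((b.getD k []) ++ [r])).length := by simpa using hk
    rw [List.foldl_cons, hstep, ih _ k hk' (fun x hx => hmem x (by simp [hx]))]
    rw [List.set_set]
    congr 1
    rw [List.getD_eq_getElem?_getD, List.getElem?_set_self, List.getD_eq_getElem?_getD,
      List.getElem?_eq_getElem hk]
    · simp
    · exact hk

-- the flat scan over the first n chunks fills the first n of m buckets (s > 0)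
theorem pv_fold_chunks (s : Int) (hs : 0 < s) (m : Nat) :
    ∀ n : Nat, n ≤ m →
      (PySem.List.pyRange 0 ((n : Int) * s) 1).foldl (pvStep s) (List.replicate m ([] : List Int))
        = (List.range n).map (fun k => PySem.List.pyRange ((k : Int) * s) (((k : Int) + 1) * s) 1)
            ++ List.replicate (m - n) ([] : List Int) := by
  intro n
  induction n with
  | zero =>
    intro _
    simp [PySem.List.pyRange_one_eq_nil (le_refl (0 : Int))]
  | succ n ih =>
    intro hnm
    have hn : n < m := by omega
    have h0 : (0 : Int) ≤ (n : Int) * s := by positivity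
    have hstep : (n : Int) * s ≤ ((n : Int) + 1) * s := by nlinarith
    have hcast : (((n + 1 : Nat)) : Int) * s = ((n : Int) + 1) * s := by push_cast; ring
    rw [hcast, PySem.List.pyRange_one_append 0 ((n : Int) * s) (((n : Int) + 1) * s) h0 hstep,
      List.foldl_append, ih (by omega)]
    set chunks := (List.range n).map (fun k => PySem.List.pyRange ((k : Int) * s) (((k : Int) + 1) * s) 1) with hchunks
    have hlenc : chunks.length = n := by simp [hchunks]
    have hlen : (chunks ++ List.replicate (m - n) ([] : List Int)).length = m := by
      simp [hlenc]; omega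
    have hmem : ∀ r ∈ PySem.List.pyRange ((n : Int) * s) (((n : Int) + 1) * s) 1,
        (PySem.Int.floordiv r s).toNat = n := by
      intro r hr
      rw [PySem.List.mem_pyRange_one] at hr
      rw [pv_div_chunk s hs n r hr.1 hr.2]
      simp
    rw [pv_fold_all_to s _ _ n (by omega) hmem]
    have hmn : m - n = (m - (n + 1)) + 1 := by omega
    have hgetD : (chunks ++ List.replicate (m - n) ([] : List Int)).getD n [] = [] := by
      rw [List.getD_append_right chunks _ [] n (by omega)]
      rw [hlenc, Nat.sub_self, hmn, List.replicate_succ, List.getD_cons_zero]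
    rw [hgetD, List.nil_append]
    have hset : (chunks ++ List.replicate (m - n) ([] : List Int)).set n
        (PySem.List.pyRange ((n : Int) * s) (((n : Int) + 1) * s) 1)
        = chunks ++ (List.replicate (m - n) ([] : List Int)).set 0
            (PySem.List.pyRange ((n : Int) * s) (((n : Int) + 1) * s) 1) := by
      rw [List.set_append_right _ _ (by omega), hlenc, Nat.sub_self]
    rw [hset, hmn, List.replicate_succ, List.set_cons_zero, List.range_succ]
    simp [hchunks]

theorem pv_main (ws s : Int) (hs : s ≠ 0) :
    generate_allreduce_groups ws s = generate_allreduce_groups_alt ws s := by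
  rw [pv_A_as_map, pv_alt_eq]
  set num := PySem.Int.floordiv ws s with hnum
  rcases lt_or_gt_of_ne hs with hneg | hpos
  · -- s < 0: every chunk of A is empty, and B's scan never moves anything
    have hA : (PySem.List.pyRange 0 num 1).map (fun i => PySem.List.pyRange (i * s) ((i + 1) * s) 1)
        = (PySem.List.pyRange 0 num 1).map (fun _ => ([] : List Int)) := by
      apply List.map_congr_left
      intro i _
      exact PySem.List.pyRange_one_eq_nil (by nlinarith)
    rw [hA]
    rcases (by omega : num * s ≤ 0 ∨ 0 < num * s) with hle | hgt
    · rw [PySem.List.pyRange_one_eq_nil hle]; rfl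
    · have hnumneg : num ≤ 0 := by nlinarith
      rw [PySem.List.pyRange_one_eq_nil hnumneg]
      simp [pv_foldl_step_nil]
  · rcases (by omega : num ≤ 0 ∨ 0 < num) with hle | hposnum
    · -- no groups at all
      have hms : num * s ≤ 0 := by nlinarith
      rw [PySem.List.pyRange_one_eq_nil hle, PySem.List.pyRange_one_eq_nil hms]
      rfl
    · have hnn : (num.toNat : Int) = num := Int.toNat_of_nonneg (le_of_lt hposnum)
      have hbuckets : (PySem.List.pyRange 0 num 1).map (fun _ => ([] : List Int))
          = List.replicate num.toNat ([] : List Int) := by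
        rw [List.eq_replicate_iff]
        constructor
        · simp [PySem.List.length_pyRange_one]
        · intro b hb
          rcases List.mem_map.mp hb with ⟨_, _, h⟩
          exact h.symm
      rw [hbuckets, ← hnn, Int.toNat_natCast, pv_fold_chunks s hpos num.toNat num.toNat (le_refl _)]
      rw [Nat.sub_self, List.replicate_zero, List.append_nil]
      rw [PySem.List.pyRange_one]
      have hmax : max num 0 = num := by omega
      simp [hmax, ← List.map_eq_flatMap, List.map_map]

-- ===== VERDICT (by name: the statement is the Claim_ definition above) =====
theorem generate_allreduce_groups_spec : Claim_equal_generate_allreduce_groups := by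
  intro ws s _ hpre
  have hs : s ≠ 0 := by rcases hpre with h | ⟨h, _⟩ <;> omega
  exact pv_main ws s hs
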